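-- pv_equiv track=rewrite | github.com/awktavian/art | orb/packages/kagami/core/workspace/enhanced_workspace.py | _identify_causal_threads
-- ===== SOURCE A (Python) =====
-- from typing import Any
--
-- def _identify_causal_threads(events: list[dict[str, Any]]) -> list[list[dict[str, Any]]]:
--     """Group events into causal sequences."""
--     threads = []
--     visited = set()
--
--     for i, event in enumerate(events):
--         if i in visited:
--             continue
--
--         # Start new thread
--         thread = [event]
--         visited.add(i)
--
--         # Find related events via correlation_id
--         corr_id = event.get("correlation_id")
--         if corr_id:
--             for j, other in enumerate(events):
--                 if j != i and other.get("correlation_id") == corr_id: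
--                     thread.append(other)
--                     visited.add(j)
--
--         if len(thread) > 1:  # Only keep threads with multiple events
--             threads.append(thread)
--
--     return threads
-- ===== SOURCE B (Python) =====
-- def _identify_causal_threads(events):
--     """Group events into causal sequences (single-pass dict grouping)."""
--     groups = {}
--     for event in events:
--         cid = event.get("correlation_id")
--         if cid:
--             groups[cid] = groups.get(cid, []) + [event]
--     return [g for g in groups.values() if len(g) > 1]
-- ===== Notes on version B (the rewrite author's own statement) =====
-- stated objective: simpler
-- what changed: A's nested visited-set scan (for each new correlation_id it rescans all events) is replaced by a single pass that groups events into a dict keyed by correlation_id and keeps the groups with more than one event.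
import Mathlib
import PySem

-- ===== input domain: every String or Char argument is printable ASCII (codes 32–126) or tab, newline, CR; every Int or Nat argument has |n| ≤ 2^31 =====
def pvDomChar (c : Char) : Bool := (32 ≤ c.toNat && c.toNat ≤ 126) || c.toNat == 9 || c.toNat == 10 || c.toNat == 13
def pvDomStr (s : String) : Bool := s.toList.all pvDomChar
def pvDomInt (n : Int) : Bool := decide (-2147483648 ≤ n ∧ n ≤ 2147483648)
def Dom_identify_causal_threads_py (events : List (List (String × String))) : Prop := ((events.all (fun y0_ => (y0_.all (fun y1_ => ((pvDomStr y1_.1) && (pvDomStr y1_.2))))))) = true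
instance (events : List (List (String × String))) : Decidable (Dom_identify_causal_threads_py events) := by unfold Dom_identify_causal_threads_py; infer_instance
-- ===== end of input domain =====

-- B: instead of A's visited-set plus inner rescan per thread starter, one dict pass grouping events by correlation_id (simpler).

-- ===== PORT A =====
-- inner loop: for j, other in enumerate(events): if j != i and other.get("correlation_id") == corr_id: ...
def aInner (i : Int) (c : String)
    (tv : List (List (String × String)) × PySem.Set Int)
    (je : Int × List (String × String)) :
    List (List (String × String)) × PySem.Set Int :=
  if je.1 ≠ i ∧ PySem.Dict.get? ⟨je.2⟩ "correlation_id" = some c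
  then (tv.1 ++ [je.2], PySem.Set.add tv.2 je.1)
  else tv

-- outer loop body: one iteration of `for i, event in enumerate(events)`
def aStep (events : List (List (String × String)))
    (st : List (List (List (String × String))) × PySem.Set Int)
    (ie : Int × List (String × String)) :
    List (List (List (String × String))) × PySem.Set Int :=
  if PySem.Set.contains st.2 ie.1 then st        -- if i in visited: continue
  else
    let visited := PySem.Set.add st.2 ie.1       -- visited.add(i)
    let thread := [ie.2]                         -- thread = [event]
    let corr := PySem.Dict.get? ⟨ie.2⟩ "correlation_id"
    let tv :=
      match corr with                            -- if corr_id: (None and "" are falsy)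
      | some c =>
          if c ≠ "" then
            (PySem.List.enumerate events).foldl (aInner ie.1 c) (thread, visited)
          else (thread, visited)
      | none => (thread, visited)
    if 1 < tv.1.length then (st.1 ++ [tv.1], tv.2) else (st.1, tv.2)

def identify_causal_threads_py (events : List (List (String × String))) : List (List (List (String × String))) :=
  ((PySem.List.enumerate events).foldl (aStep events) ([], PySem.Set.empty)).1

-- ===== PORT B =====
-- one iteration of `for event in events`: groups[cid] = groups.get(cid, []) + [event]
def bStep (d : PySem.Dict String (List (List (String × String)))) (e : List (String × String)) :
    PySem.Dict String (List (List (String × String))) :=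
  match PySem.Dict.get? ⟨e⟩ "correlation_id" with
  | some c => if c ≠ "" then PySem.Dict.insert d c (PySem.Dict.getD d c [] ++ [e]) else d
  | none => d

def identify_causal_threads_py_alt (events : List (List (String × String))) : List (List (List (String × String))) :=
  (PySem.Dict.values (events.foldl bStep PySem.Dict.empty)).filter (fun g => decide (1 < g.length))

-- ===== PRECONDITION & SPEC =====
def Spec_identify_causal_threads_py (events : List (List (String × String))) (out : List (List (List (String × String)))) : Prop := out = identify_causal_threads_py_alt events
instance (events : List (List (String × String))) (out : List (List (List (String × String)))) : Decidable (Spec_identify_causal_threads_py events out) := by unfold Spec_identify_causal_threads_py; infer_instance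

-- ===== CLAIM (what is proved, stated in full; the proofs are below) =====
def Claim_equal_identify_causal_threads_py : Prop := ∀ (events : List (List (String × String))), Dom_identify_causal_threads_py events → Spec_identify_causal_threads_py events (identify_causal_threads_py events)

-- ===== LEMMAS AND PROOFS =====

-- the "active" correlation id of an event: its correlation_id when present and truthy
def act (e : List (String × String)) : Option String :=
  match PySem.Dict.get? ⟨e⟩ "correlation_id" with
  | some c => if c = "" then none else some c
  | none => none

-- the distinct active correlation ids of a list, in first-occurrence order
def cids (l : List (List (String × String))) : List String :=
  PySem.List.dedup (l.filterMap act)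

-- all events of `l` whose active correlation id is c, in order
def grp (l : List (List (String × String))) (c : String) : List (List (String × String)) :=
  l.filter (fun e => decide (act e = some c))

-- the common reference value both ports are proved equal to
def S (events : List (List (String × String))) : List (List (List (String × String))) :=
  ((cids events).map (grp events)).filter (fun g => decide (1 < g.length))

lemma act_eq_some_iff (e : List (String × String)) (c : String) (hc : c ≠ "") :
    act e = some c ↔ PySem.Dict.get? ⟨e⟩ "correlation_id" = some c := by
  unfold act
  cases h : PySem.Dict.get? (⟨e⟩ : PySem.Dict String String) "correlation_id" with
  | none => simp
  | some s =>
      by_cases hs : s = "" <;> simp [hs]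
      rintro rfl; exact absurd rfl hc

lemma grp_append (l : List (List (String × String))) (e : List (String × String)) (c : String) :
    grp (l ++ [e]) c = grp l c ++ (if act e = some c then [e] else []) := by
  unfold grp
  rw [List.filter_append]
  by_cases h : act e = some c <;> simp [h]

lemma cids_append_of_none (l : List (List (String × String))) (e : List (String × String))
    (h : act e = none) : cids (l ++ [e]) = cids l := by
  unfold cids
  rw [List.filterMap_append]
  simp [h]

lemma cids_append_of_mem (l : List (List (String × String))) (e : List (String × String))
    (c : String) (h : act e = some c) (hm : c ∈ cids l) : cids (l ++ [e]) = cids l := by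
  unfold cids at *
  rw [List.filterMap_append, PySem.List.dedup_eq_ofList] at *
  simp [h, PySem.Set.ofList_append_singleton, PySem.Set.add_of_mem hm]

lemma cids_append_of_not_mem (l : List (List (String × String))) (e : List (String × String))
    (c : String) (h : act e = some c) (hm : c ∉ cids l) : cids (l ++ [e]) = cids l ++ [c] := by
  unfold cids at *
  rw [List.filterMap_append, PySem.List.dedup_eq_ofList] at *
  simp [h, PySem.Set.ofList_append_singleton, PySem.Set.add_of_not_mem hm]

lemma mem_cids_iff (l : List (List (String × String))) (c : String) :
    c ∈ cids l ↔ ∃ e ∈ l, act e = some c := by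
  unfold cids
  rw [PySem.List.dedup_eq_ofList]
  rw [PySem.Set.mem_ofList]
  simp [List.mem_filterMap]

lemma nodup_cids (l : List (List (String × String))) : (cids l).Nodup := by
  unfold cids
  rw [PySem.List.dedup_eq_ofList]
  exact PySem.Set.nodup_ofList _

-- ===== B-side =====

lemma bStep_none (d : PySem.Dict String (List (List (String × String)))) (e : List (String × String))
    (h : act e = none) : bStep d e = d := by
  unfold bStep
  unfold act at h
  cases hg : PySem.Dict.get? (⟨e⟩ : PySem.Dict String String) "correlation_id" with
  | none => rfl
  | some c =>
      rw [hg] at h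
      by_cases hc : c = ""
      · simp [hc]
      · simp [hc] at h

lemma bStep_some (d : PySem.Dict String (List (List (String × String)))) (e : List (String × String))
    (c : String) (h : act e = some c) : bStep d e = d.insert c (d.getD c [] ++ [e]) := by
  unfold bStep
  unfold act at h
  cases hg : PySem.Dict.get? (⟨e⟩ : PySem.Dict String String) "correlation_id" with
  | none => rw [hg] at h; exact absurd h (by simp)
  | some c' =>
      rw [hg] at h
      by_cases hc : c' = ""
      · simp [hc] at h
      · simp only [hc] at h
        have : c' = c := by simpa using h
        subst this
        simp [hc]

lemma b_inv (l : List (List (String × String))) :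
    (l.foldl bStep PySem.Dict.empty).items = (cids l).map (fun c => (c, grp l c)) := by
  induction l using List.reverseRecOn with
  | nil => rfl
  | append_singleton p e ih =>
      rw [List.foldl_append, List.foldl_cons, List.foldl_nil]
      set d := p.foldl bStep PySem.Dict.empty with hd
      have hkeys : d.keys = cids p := by
        rw [PySem.Dict.keys, ih, List.map_map]
        exact List.map_id' (cids p)
      have hnk : d.keys.Nodup := by
        rw [hkeys]; exact nodup_cids p
      cases hact : act e with
      | none =>
          rw [bStep_none d e hact, cids_append_of_none p e hact, ih]

          refine List.map_congr_left (fun c hc => ?_)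
          rw [grp_append]
          simp [hact]
      | some c =>
          rw [bStep_some d e c hact]
          by_cases hm : c ∈ cids p
          · -- key already present: in-place overwrite
            have hcontains : d.contains c = true := by
              rw [PySem.Dict.contains_iff_mem_keys, hkeys]; exact hm
            have hitem : (c, grp p c) ∈ d.items := by
              rw [ih]; exact List.mem_map_of_mem hm
            have hgetD : d.getD c [] = grp p c :=
              PySem.Dict.getD_of_mem_items _ hitem hnk []
            rw [PySem.Dict.items_insert, if_pos hcontains, hgetD, ih, List.map_map,
                cids_append_of_mem p e c hact hm]
            refine List.map_congr_left (fun c' hc' => ?_)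
            simp only [Function.comp]
            rw [grp_append]
            by_cases hcc : c' = c
            · subst hcc; simp [hact]
            · rw [if_neg (by simp [hcc]), if_neg (by rw [hact]; exact fun h => hcc (Option.some.inj h).symm)]
              simp
          · -- new key: appended at the end
            have hcontains : d.contains c = false := by
              rw [Bool.eq_false_iff]
              intro h
              exact hm (hkeys ▸ (PySem.Dict.contains_iff_mem_keys _ c).mp h)
            have hgetD : d.getD c [] = [] :=
              PySem.Dict.getD_of_not_contains _ [] hcontains
            have hgrp : grp p c = [] := by
              unfold grp
              rw [List.filter_eq_nil_iff]
              intro a ha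
              simp only [decide_eq_true_eq]
              intro hac
              exact hm ((mem_cids_iff p c).mpr ⟨a, ha, hac⟩)
            rw [PySem.Dict.items_insert, if_neg (by rw [hcontains]; simp), hgetD,
                cids_append_of_not_mem p e c hact hm, ih, List.map_append]
            congr 1
            · refine List.map_congr_left (fun c' hc' => ?_)
              rw [grp_append]
              have hcc : c' ≠ c := fun h => hm (h ▸ hc')
              rw [if_neg (by rw [hact]; exact fun h => hcc (Option.some.inj h).symm)]
              simp
            · simp [grp_append, hact, hgrp]

lemma b_eq_S (events : List (List (String × String))) :
    identify_causal_threads_py_alt events = S events := by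
  unfold identify_causal_threads_py_alt S
  rw [PySem.Dict.values, b_inv, List.map_map]
  rfl

-- ===== A-side =====

-- the contents of A's visited set after processing the first n events
def Vmem (events : List (List (String × String))) (n : Nat) (x : Int) : Prop :=
  ∃ k : Nat, ∃ _ : k < events.length,
    x = (k : Int) ∧ (k < n ∨ ∃ c, act events[k] = some c ∧ c ∈ cids (events.take n))

-- A's state after the outer loop has consumed the first n events
def aFold (events : List (List (String × String))) (n : Nat) :
    List (List (List (String × String))) × PySem.Set Int :=
  (PySem.List.enumerate (events.take n)).foldl (aStep events) ([], PySem.Set.empty)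

lemma aInner_pos (i : Int) (c : String) (tv : List (List (String × String)) × PySem.Set Int)
    (je : Int × List (String × String))
    (h : je.1 ≠ i ∧ PySem.Dict.get? (⟨je.2⟩ : PySem.Dict String String) "correlation_id" = some c) :
    aInner i c tv je = (tv.1 ++ [je.2], PySem.Set.add tv.2 je.1) := by
  unfold aInner; rw [if_pos h]

lemma aInner_neg (i : Int) (c : String) (tv : List (List (String × String)) × PySem.Set Int)
    (je : Int × List (String × String))
    (h : ¬(je.1 ≠ i ∧ PySem.Dict.get? (⟨je.2⟩ : PySem.Dict String String) "correlation_id" = some c)) :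
    aInner i c tv je = tv := by
  unfold aInner; rw [if_neg h]

-- the filterMap form of A's inner matching loop
def acond (i : Int) (c : String) (je : Int × List (String × String)) : Option (List (String × String)) :=
  if je.1 ≠ i ∧ PySem.Dict.get? ⟨je.2⟩ "correlation_id" = some c then some je.2 else none

lemma aInner_fst (i : Int) (c : String) :
    ∀ (l : List (List (String × String))) (s : Int) (th : List (List (String × String)))
      (vs : PySem.Set Int),
      ((PySem.List.enumerate l s).foldl (aInner i c) (th, vs)).1 =
        th ++ (PySem.List.enumerate l s).filterMap (acond i c) := by
  intro l
  induction l with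
  | nil => intro s th vs; simp [PySem.List.enumerate]
  | cons x xs ih =>
      intro s th vs
      rw [PySem.List.enumerate_cons, List.foldl_cons, List.filterMap_cons]
      by_cases h : ((s, x) : Int × List (String × String)).1 ≠ i ∧ PySem.Dict.get? (⟨(s, x).2⟩ : PySem.Dict String String) "correlation_id" = some c
      · rw [aInner_pos i c _ _ h, show acond i c (s, x) = some (s, x).2 from by unfold acond; rw [if_pos h], ih]
        simp
      · rw [aInner_neg i c _ _ h, show acond i c (s, x) = none from by unfold acond; rw [if_neg h], ih]

lemma aInner_snd_mem (i : Int) (c : String) :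
    ∀ (l : List (List (String × String))) (s : Int) (th : List (List (String × String)))
      (vs : PySem.Set Int) (x : Int),
      x ∈ ((PySem.List.enumerate l s).foldl (aInner i c) (th, vs)).2 ↔
        x ∈ vs ∨ ∃ je ∈ PySem.List.enumerate l s,
          (je.1 ≠ i ∧ PySem.Dict.get? ⟨je.2⟩ "correlation_id" = some c) ∧ x = je.1 := by
  intro l
  induction l with
  | nil => intro s th vs x; simp [PySem.List.enumerate]
  | cons y xs ih =>
      intro s th vs x
      rw [PySem.List.enumerate_cons, List.foldl_cons]
      by_cases h : ((s, y) : Int × List (String × String)).1 ≠ i ∧ PySem.Dict.get? (⟨(s, y).2⟩ : PySem.Dict String String) "correlation_id" = some c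
      · rw [aInner_pos i c _ _ h, ih]
        rw [PySem.Set.mem_add]
        constructor
        · rintro ((hv | hx) | ⟨je, hje, hc', hx⟩)
          · exact Or.inl hv
          · exact Or.inr ⟨(s, y), by simp, h, hx⟩
          · exact Or.inr ⟨je, by simp [hje], hc', hx⟩
        · rintro (hv | ⟨je, hje, hc', hx⟩)
          · exact Or.inl (Or.inl hv)
          · rcases List.mem_cons.mp hje with rfl | hje'
            · exact Or.inl (Or.inr hx)
            · exact Or.inr ⟨je, hje', hc', hx⟩
      · rw [aInner_neg i c _ _ h, ih]
        constructor
        · rintro (hv | ⟨je, hje, hc', hx⟩)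
          · exact Or.inl hv
          · exact Or.inr ⟨je, by simp [hje], hc', hx⟩
        · rintro (hv | ⟨je, hje, hc', hx⟩)
          · exact Or.inl hv
          · rcases List.mem_cons.mp hje with rfl | hje'
            · exact absurd hc' h
            · exact Or.inr ⟨je, hje', hc', hx⟩

lemma filterMap_acond_of_lt (i : Int) (c : String) :
    ∀ (l : List (List (String × String))) (s : Int), i < s →
      (PySem.List.enumerate l s).filterMap (acond i c) =
        l.filter (fun e => decide (PySem.Dict.get? ⟨e⟩ "correlation_id" = some c)) := by
  intro l
  induction l with
  | nil => intro s _; simp [PySem.List.enumerate]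
  | cons x xs ih =>
      intro s hs
      rw [PySem.List.enumerate_cons, List.filterMap_cons, List.filter_cons]
      have hne : ((s, x) : Int × List (String × String)).1 ≠ i := by
        simp only []; omega
      by_cases h : PySem.Dict.get? (⟨x⟩ : PySem.Dict String String) "correlation_id" = some c
      · rw [show acond i c (s, x) = some (s, x).2 from by unfold acond; rw [if_pos ⟨hne, h⟩],
            if_pos (by simpa using h), ih (s + 1) (by omega)]
      · rw [show acond i c (s, x) = none from by unfold acond; rw [if_neg (fun hh => h hh.2)],
            if_neg (by simpa using h), ih (s + 1) (by omega)]

lemma filterMap_acond_of_no_match (i : Int) (c : String) (hc : c ≠ "") :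
    ∀ (l : List (List (String × String))) (s : Int), (∀ e ∈ l, act e ≠ some c) →
      (PySem.List.enumerate l s).filterMap (acond i c) = [] := by
  intro l
  induction l with
  | nil => intro s _; simp [PySem.List.enumerate]
  | cons x xs ih =>
      intro s hno
      rw [PySem.List.enumerate_cons, List.filterMap_cons]
      rw [show acond i c (s, x) = none from by
            unfold acond
            rw [if_neg]
            rintro ⟨-, hg⟩
            exact hno x (List.mem_cons_self) ((act_eq_some_iff x c hc).mpr hg),
          ih (s + 1) (fun e he => hno e (List.mem_cons_of_mem _ he))]

lemma aStep_skip (events : List (List (String × String)))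
    (st : List (List (List (String × String))) × PySem.Set Int)
    (ie : Int × List (String × String)) (h : PySem.Set.contains st.2 ie.1 = true) :
    aStep events st ie = st := by
  unfold aStep
  rw [if_pos h]

lemma aStep_inactive (events : List (List (String × String)))
    (st : List (List (List (String × String))) × PySem.Set Int)
    (ie : Int × List (String × String)) (h : PySem.Set.contains st.2 ie.1 = false)
    (ha : act ie.2 = none) :
    aStep events st ie = (st.1, PySem.Set.add st.2 ie.1) := by
  unfold aStep
  rw [if_neg (by rw [h]; simp)]
  unfold act at ha
  cases hg : PySem.Dict.get? (⟨ie.2⟩ : PySem.Dict String String) "correlation_id" with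
  | none => simp
  | some c =>
      rw [hg] at ha
      by_cases hc : c = ""
      · simp [hc]
      · simp [hc] at ha

lemma aStep_active (events : List (List (String × String)))
    (st : List (List (List (String × String))) × PySem.Set Int)
    (ie : Int × List (String × String)) (c : String)
    (h : PySem.Set.contains st.2 ie.1 = false)
    (hg : PySem.Dict.get? (⟨ie.2⟩ : PySem.Dict String String) "correlation_id" = some c) (hc : c ≠ "") :
    aStep events st ie =
      (if 1 < ((PySem.List.enumerate events).foldl (aInner ie.1 c) ([ie.2], PySem.Set.add st.2 ie.1)).1.length
       then (st.1 ++ [((PySem.List.enumerate events).foldl (aInner ie.1 c) ([ie.2], PySem.Set.add st.2 ie.1)).1],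
             ((PySem.List.enumerate events).foldl (aInner ie.1 c) ([ie.2], PySem.Set.add st.2 ie.1)).2)
       else (st.1, ((PySem.List.enumerate events).foldl (aInner ie.1 c) ([ie.2], PySem.Set.add st.2 ie.1)).2)) := by
  unfold aStep
  rw [if_neg (by rw [h]; simp)]
  simp [hg, hc]

lemma aFold_succ (events : List (List (String × String))) (n : Nat) (hn : n < events.length) :
    aFold events (n + 1) = aStep events (aFold events n) ((n : Int), events[n]) := by
  unfold aFold
  rw [List.take_add_one, List.getElem?_eq_getElem hn]
  simp only [Option.toList_some]
  rw [PySem.List.enumerate_append, List.foldl_append]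
  have hlen : (events.take n).length = n := List.length_take_of_le (le_of_lt hn)
  rw [hlen]
  simp [PySem.List.enumerate]

lemma a_inv (events : List (List (String × String))) :
    ∀ n, n ≤ events.length →
      (aFold events n).1 = ((cids (events.take n)).map (grp events)).filter (fun g => decide (1 < g.length))
      ∧ (∀ x : Int, x ∈ (aFold events n).2 ↔ Vmem events n x) := by
  intro n
  induction n with
  | zero =>
      intro _
      refine ⟨rfl, fun x => ?_⟩
      unfold aFold Vmem
      simp [PySem.Set.empty, cids, act]
  | succ n ih =>
      intro hsucc
      have hn : n < events.length := hsucc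
      obtain ⟨ih1, ih2⟩ := ih (le_of_lt hn)
      rw [aFold_succ events n hn]
      have htake : events.take (n + 1) = events.take n ++ [events[n]] := by
        rw [List.take_add_one, List.getElem?_eq_getElem hn]; rfl
      by_cases hv : PySem.Set.contains (aFold events n).2 ((n : Int)) = true
      · -- index n was already visited: the step is a no-op
        have hVnn : Vmem events n ((n : Int)) :=
          (ih2 _).mp ((PySem.Set.contains_iff _ _).mp hv)
        obtain ⟨k, hk, hkn, hdisj⟩ := hVnn
        have hkeq : n = k := by exact_mod_cast hkn
        subst hkeq
        rcases hdisj with h | ⟨c, hc1, hc2⟩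
        · omega
        have hcids : cids (events.take (n + 1)) = cids (events.take n) := by
          rw [htake]; exact cids_append_of_mem _ _ _ hc1 hc2
        rw [aStep_skip _ _ _ hv]
        refine ⟨by rw [hcids]; exact ih1, fun x => ?_⟩
        rw [ih2 x]
        unfold Vmem
        constructor
        · rintro ⟨m, hm, rfl, h | ⟨c', h1, h2⟩⟩
          · exact ⟨m, hm, rfl, Or.inl (Nat.lt_succ_of_lt h)⟩
          · exact ⟨m, hm, rfl, Or.inr ⟨c', h1, hcids ▸ h2⟩⟩
        · rintro ⟨m, hm, rfl, h | ⟨c', h1, h2⟩⟩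
          · rcases Nat.lt_succ_iff_lt_or_eq.mp h with h' | rfl
            · exact ⟨m, hm, rfl, Or.inl h'⟩
            · exact ⟨m, hm, rfl, Or.inr ⟨c, hc1, hc2⟩⟩
          · rw [hcids] at h2
            exact ⟨m, hm, rfl, Or.inr ⟨c', h1, h2⟩⟩
      · -- index n is fresh
        have hv' : PySem.Set.contains (aFold events n).2 ((n : Int)) = false := by
          revert hv; cases PySem.Set.contains (aFold events n).2 ((n : Int)) <;> simp
        have hVnn : ¬ Vmem events n ((n : Int)) := fun h =>
          hv ((PySem.Set.contains_iff _ _).mpr ((ih2 _).mpr h))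
        cases hg : PySem.Dict.get? (⟨events[n]⟩ : PySem.Dict String String) "correlation_id" with
        | none =>
            have hact : act events[n] = none := by unfold act; rw [hg]
            have hcids : cids (events.take (n + 1)) = cids (events.take n) := by
              rw [htake]; exact cids_append_of_none _ _ hact
            rw [aStep_inactive _ _ _ hv' hact]
            refine ⟨by rw [hcids]; exact ih1, fun x => ?_⟩
            rw [PySem.Set.mem_add, ih2 x]
            unfold Vmem
            constructor
            · rintro (⟨m, hm, rfl, h | ⟨c', h1, h2⟩⟩ | rfl)
              · exact ⟨m, hm, rfl, Or.inl (Nat.lt_succ_of_lt h)⟩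
              · exact ⟨m, hm, rfl, Or.inr ⟨c', h1, hcids ▸ h2⟩⟩
              · exact ⟨n, hn, rfl, Or.inl (Nat.lt_succ_self n)⟩
            · rintro ⟨m, hm, rfl, h | ⟨c', h1, h2⟩⟩
              · rcases Nat.lt_succ_iff_lt_or_eq.mp h with h' | rfl
                · exact Or.inl ⟨m, hm, rfl, Or.inl h'⟩
                · exact Or.inr rfl
              · rw [hcids] at h2
                exact Or.inl ⟨m, hm, rfl, Or.inr ⟨c', h1, h2⟩⟩
        | some c =>
            by_cases hc : c = ""
            · subst hc
              have hact : act events[n] = none := by unfold act; rw [hg]; simp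
              have hcids : cids (events.take (n + 1)) = cids (events.take n) := by
                rw [htake]; exact cids_append_of_none _ _ hact
              rw [aStep_inactive _ _ _ hv' hact]
              refine ⟨by rw [hcids]; exact ih1, fun x => ?_⟩
              rw [PySem.Set.mem_add, ih2 x]
              unfold Vmem
              constructor
              · rintro (⟨m, hm, rfl, h | ⟨c', h1, h2⟩⟩ | rfl)
                · exact ⟨m, hm, rfl, Or.inl (Nat.lt_succ_of_lt h)⟩
                · exact ⟨m, hm, rfl, Or.inr ⟨c', h1, hcids ▸ h2⟩⟩
                · exact ⟨n, hn, rfl, Or.inl (Nat.lt_succ_self n)⟩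
              · rintro ⟨m, hm, rfl, h | ⟨c', h1, h2⟩⟩
                · rcases Nat.lt_succ_iff_lt_or_eq.mp h with h' | rfl
                  · exact Or.inl ⟨m, hm, rfl, Or.inl h'⟩
                  · exact Or.inr rfl
                · rw [hcids] at h2
                  exact Or.inl ⟨m, hm, rfl, Or.inr ⟨c', h1, h2⟩⟩
            · -- the interesting case: a fresh event with a truthy correlation id
              have hact : act events[n] = some c := (act_eq_some_iff _ c hc).mpr hg
              have hcnot : c ∉ cids (events.take n) := fun hm =>
                hVnn ⟨n, hn, rfl, Or.inr ⟨c, hact, hm⟩⟩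
              have hcids : cids (events.take (n + 1)) = cids (events.take n) ++ [c] := by
                rw [htake]; exact cids_append_of_not_mem _ _ _ hact hcnot
              have hfirst : ∀ e' ∈ events.take n, act e' ≠ some c := fun e' he' hae =>
                hcnot ((mem_cids_iff _ _).mpr ⟨e', he', hae⟩)
              have hdecomp : events = events.take n ++ [events[n]] ++ events.drop (n + 1) := by
                conv_lhs => rw [← List.take_append_drop (n + 1) events]
                rw [htake]
              have henum : PySem.List.enumerate events 0 =
                  PySem.List.enumerate (events.take n) 0 ++ [((n : Int), events[n])] ++
                    PySem.List.enumerate (events.drop (n + 1)) ((n : Int) + 1) := by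
                conv_lhs => rw [hdecomp]
                rw [PySem.List.enumerate_append, PySem.List.enumerate_append]
                have h1 : (events.take n).length = n := List.length_take_of_le (le_of_lt hn)
                have h2 : (events.take n ++ [events[n]]).length = n + 1 := by
                  rw [List.length_append, h1]; rfl
                rw [h1, h2]
                simp [PySem.List.enumerate]
              have hfm : (PySem.List.enumerate events 0).filterMap (acond ((n : Int)) c) =
                  (events.drop (n + 1)).filter
                    (fun e' => decide (PySem.Dict.get? ⟨e'⟩ "correlation_id" = some c)) := by
                rw [henum, List.filterMap_append, List.filterMap_append,
                    filterMap_acond_of_no_match _ c hc _ _ hfirst,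
                    filterMap_acond_of_lt _ c _ _ (by omega)]
                have hmid : acond ((n : Int)) c ((n : Int), events[n]) = none := by
                  unfold acond
                  rw [if_neg]
                  rintro ⟨hne, -⟩
                  exact hne rfl
                simp [hmid]
              have hdropfilter : grp (events.drop (n + 1)) c =
                  (events.drop (n + 1)).filter
                    (fun e' => decide (PySem.Dict.get? ⟨e'⟩ "correlation_id" = some c)) := by
                unfold grp
                refine List.filter_congr (fun e' _ => ?_)
                have := act_eq_some_iff e' c hc
                by_cases ha : act e' = some c
                · rw [decide_eq_true ha, (decide_eq_true (this.mp ha)).symm]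
                · rw [decide_eq_false ha, decide_eq_false (fun hh => ha (this.mpr hh))]
              have hgrp : grp events c = events[n] :: grp (events.drop (n + 1)) c := by
                unfold grp
                conv_lhs => rw [hdecomp]
                rw [List.filter_append, List.filter_append,
                    List.filter_eq_nil_iff.mpr (fun a ha => by
                      simp only [decide_eq_true_eq]
                      exact hfirst a ha)]
                simp [hact]
              have hthread :
                  ((PySem.List.enumerate events).foldl (aInner ((n : Int)) c)
                    ([events[n]], PySem.Set.add (aFold events n).2 ((n : Int)))).1 = grp events c := by
                rw [aInner_fst, hfm, hgrp, hdropfilter]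
                rfl
              rw [aStep_active events _ _ c hv' hg hc]
              have hsnd : ∀ x : Int, x ∈ ((PySem.List.enumerate events).foldl (aInner ((n : Int)) c)
                  ([events[n]], PySem.Set.add (aFold events n).2 ((n : Int)))).2 ↔
                  (Vmem events n x ∨ x = (n : Int)) ∨
                    ∃ k : Nat, ∃ _ : k < events.length,
                      ((k : Int) ≠ (n : Int) ∧
                        PySem.Dict.get? (⟨events[k]⟩ : PySem.Dict String String) "correlation_id" = some c) ∧
                        x = (k : Int) := by
                intro x
                rw [aInner_snd_mem, PySem.Set.mem_add, ih2 x]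
                constructor
                · rintro (h | ⟨je, hje, hcnd, rfl⟩)
                  · exact Or.inl h
                  · obtain ⟨k, hk, rfl⟩ := (PySem.List.mem_enumerate_iff _ _ _).mp hje
                    exact Or.inr ⟨k, hk, ⟨by simpa using hcnd.1, hcnd.2⟩, by simp⟩
                · rintro (h | ⟨k, hk, ⟨hne, hgk⟩, rfl⟩)
                  · exact Or.inl h
                  · exact Or.inr ⟨((0 : Int) + (k : Int), events[k]),
                      (PySem.List.mem_enumerate_iff _ _ _).mpr ⟨k, hk, rfl⟩,
                      ⟨by simpa using hne, hgk⟩, by simp⟩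
              have hfinal : ∀ x : Int,
                  ((Vmem events n x ∨ x = (n : Int)) ∨
                    ∃ k : Nat, ∃ _ : k < events.length,
                      ((k : Int) ≠ (n : Int) ∧
                        PySem.Dict.get? (⟨events[k]⟩ : PySem.Dict String String) "correlation_id" = some c) ∧
                        x = (k : Int)) ↔ Vmem events (n + 1) x := by
                intro x
                unfold Vmem
                constructor
                · rintro ((⟨m, hm, rfl, h' | ⟨c', h1, h2⟩⟩ | rfl) | ⟨k, hk, ⟨hne, hgk⟩, rfl⟩)
                  · exact ⟨m, hm, rfl, Or.inl (Nat.lt_succ_of_lt h')⟩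
                  · exact ⟨m, hm, rfl, Or.inr ⟨c', h1, by rw [hcids]; exact List.mem_append_left _ h2⟩⟩
                  · exact ⟨n, hn, rfl, Or.inl (Nat.lt_succ_self n)⟩
                  · exact ⟨k, hk, rfl, Or.inr ⟨c, (act_eq_some_iff _ c hc).mpr hgk,
                      by rw [hcids]; exact List.mem_append_right _ (List.mem_singleton.mpr rfl)⟩⟩
                · rintro ⟨m, hm, rfl, h | ⟨c', h1, h2⟩⟩
                  · rcases Nat.lt_succ_iff_lt_or_eq.mp h with h' | rfl
                    · exact Or.inl (Or.inl ⟨m, hm, rfl, Or.inl h'⟩)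
                    · exact Or.inl (Or.inr rfl)
                  · rw [hcids] at h2
                    rcases List.mem_append.mp h2 with h2 | h2
                    · exact Or.inl (Or.inl ⟨m, hm, rfl, Or.inr ⟨c', h1, h2⟩⟩)
                    · have hcc : c' = c := List.mem_singleton.mp h2
                      subst hcc
                      by_cases hmn : m = n
                      · subst hmn; exact Or.inl (Or.inr rfl)
                      · exact Or.inr ⟨m, hm, ⟨by exact_mod_cast hmn, (act_eq_some_iff _ c' hc).mp h1⟩, rfl⟩
              by_cases hlen : 1 < ((PySem.List.enumerate events).foldl (aInner ((n : Int)) c)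
                  ([events[n]], PySem.Set.add (aFold events n).2 ((n : Int)))).1.length
              · rw [if_pos hlen]
                refine ⟨?_, fun x => by rw [show ((aFold events n).1 ++ [_], _).2 =
                    ((PySem.List.enumerate events).foldl (aInner ((n : Int)) c)
                      ([events[n]], PySem.Set.add (aFold events n).2 ((n : Int)))).2 from rfl,
                    hsnd x, hfinal x]⟩
                rw [hthread] at hlen ⊢
                rw [hcids, List.map_append, List.filter_append, ← ih1]
                simp [hlen]
              · rw [if_neg hlen]
                refine ⟨?_, fun x => by rw [show ((aFold events n).1, _).2 =
                    ((PySem.List.enumerate events).foldl (aInner ((n : Int)) c)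
                      ([events[n]], PySem.Set.add (aFold events n).2 ((n : Int)))).2 from rfl,
                    hsnd x, hfinal x]⟩
                rw [hthread] at hlen
                rw [hcids, List.map_append, List.filter_append, ← ih1]
                simp [hlen]

lemma a_eq_S (events : List (List (String × String))) :
    identify_causal_threads_py events = S events := by
  have h := (a_inv events events.length le_rfl).1
  unfold aFold at h
  rw [List.take_length] at h
  unfold identify_causal_threads_py S
  rw [h]

-- ===== VERDICT (by name: the statement is the Claim_ definition above) =====
theorem identify_causal_threads_py_spec : Claim_equal_identify_causal_threads_py := by
  intro events _
  unfold Spec_identify_causal_threads_py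
  rw [a_eq_S, b_eq_S]
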